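-- pv_equiv track=rewrite | github.com/jhajagos/BrandGenericDrugIdentification | drug_name_obscurer_for_generating_learning_set.py | generate_collapsed_drug_name
-- ===== SOURCE A (Python) =====
-- SPACING_BEFORE_AFTER = {"(": (1, 0), ")": (0, 1), "-": (1, 1), ",": (0, 1)}
--
-- def generate_collapsed_drug_name(drug_detail_dict, token_pattern):
--     generated_drug_string = ""
--     i = 0
--
--     for token in token_pattern:
--         if token in drug_detail_dict:
--             extracted_token = drug_detail_dict[token]
--         else:
--             extracted_token = token
--
--         if token in SPACING_BEFORE_AFTER:
--             spacing = SPACING_BEFORE_AFTER[token]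
--             if spacing[0]:
--                 generated_drug_string += " "
--             else:
--                 generated_drug_string = generated_drug_string.rstrip()
--
--         generated_drug_string += extracted_token
--
--         if token in SPACING_BEFORE_AFTER:
--             spacing = SPACING_BEFORE_AFTER[token]
--             if not spacing[1]:
--                 generated_drug_string = generated_drug_string.rstrip()
--             else:
--                 generated_drug_string += " "
--         else:
--             generated_drug_string += " "
--
--         i += 1
--
--     #TODO: Add random spacing
--     #TODO: Add random spelling mistakes
--
--     return " ".join(generated_drug_string.rstrip().split())
-- ===== SOURCE B (Python) =====
-- SPACING_BEFORE_AFTER = {"(": (1, 0), ")": (0, 1), "-": (1, 1), ",": (0, 1)}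
--
--
-- def _rstrip_tail(words):
--     """Remove trailing whitespace from the word list, dropping words that
--     become empty (this is what rstrip on the concatenated string does)."""
--     while words and not words[-1].rstrip():
--         words.pop()
--     if words:
--         words[-1] = words[-1].rstrip()
--
--
-- def generate_collapsed_drug_name(drug_detail_dict, token_pattern):
--     # Build a list of words instead of one string; only word boundaries
--     # survive the final whitespace normalization, so we decide per token
--     # whether it glues onto the previous word or starts a new one.
--     words = []
--     glue_next = False  # previous token suppressed its trailing space ('(')
--     for token in token_pattern:
--         extracted = drug_detail_dict.get(token, token)
--         spacing = SPACING_BEFORE_AFTER.get(token)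
--         if spacing is not None and spacing[0] == 0:
--             _rstrip_tail(words)  # ')' and ',' strip back and glue
--             glue = True
--         else:
--             glue = spacing is None and glue_next
--         if glue and words:
--             words[-1] += extracted
--         else:
--             words.append(extracted)
--         if spacing is not None and spacing[1] == 0:
--             _rstrip_tail(words)  # '(' leaves no space after itself
--             glue_next = True
--         else:
--             glue_next = False
--     return " ".join(" ".join(words).split())
-- ===== Notes on version B (the rewrite author's own statement) =====
-- stated objective: alternative
-- what changed: A mutates one big string with appends and repeated rstrip calls; B builds a list of words, deciding per token whether it glues onto the previous word or starts a new one, and joins the words at the end.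
import Mathlib
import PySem

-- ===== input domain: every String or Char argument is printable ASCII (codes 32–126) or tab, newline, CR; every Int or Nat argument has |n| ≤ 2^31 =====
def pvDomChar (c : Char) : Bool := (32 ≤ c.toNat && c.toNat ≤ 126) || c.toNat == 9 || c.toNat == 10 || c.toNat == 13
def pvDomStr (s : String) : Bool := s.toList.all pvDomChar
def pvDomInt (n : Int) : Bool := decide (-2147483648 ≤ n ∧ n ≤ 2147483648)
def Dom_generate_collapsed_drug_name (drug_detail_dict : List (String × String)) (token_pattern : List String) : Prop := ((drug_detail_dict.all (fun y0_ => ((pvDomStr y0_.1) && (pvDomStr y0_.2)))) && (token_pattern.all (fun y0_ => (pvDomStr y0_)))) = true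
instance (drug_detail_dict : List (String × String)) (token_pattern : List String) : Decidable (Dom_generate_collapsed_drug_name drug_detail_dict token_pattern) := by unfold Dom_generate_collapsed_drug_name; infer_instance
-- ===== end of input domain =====

-- B replaces A's single-string surgery (append / rstrip on the whole string) by a
-- word-list accumulator with an explicit glue-or-new-word decision per token;
-- objective: alternative decomposition, same observable result.

-- ===== PORT A =====
def pvSPACING : PySem.Dict String (Int × Int) :=
  PySem.Dict.mk [("(", (1, 0)), (")", (0, 1)), ("-", (1, 1)), (",", (0, 1))]

-- one iteration of A's for-loop; state = (generated_drug_string as chars, i)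
def pvAStep (d : PySem.Dict String String) (st : List Char × Int) (token : String) :
    List Char × Int :=
  let extracted_token : List Char :=
    if d.contains token = true then ((d.get? token).getD token).toList else token.toList
  let s := st.1
  let s :=
    match pvSPACING.get? token with
    | some spacing => if spacing.1 ≠ 0 then s ++ [' '] else PySem.Chars.rstrip s
    | none => s
  let s := s ++ extracted_token
  let s :=
    match pvSPACING.get? token with
    | some spacing => if spacing.2 = 0 then PySem.Chars.rstrip s else s ++ [' ']
    | none => s ++ [' ']
  (s, st.2 + 1)

def generate_collapsed_drug_name (drug_detail_dict : List (String × String))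
    (token_pattern : List String) : String :=
  let st := token_pattern.foldl (pvAStep (PySem.Dict.mk drug_detail_dict)) ([], 0)
  String.ofList (PySem.Chars.join [' '] (PySem.Chars.split₀ (PySem.Chars.rstrip st.1)))

-- ===== PORT B =====
-- Source B's _rstrip_tail: drop whitespace-only words from the end, rstrip the survivor
def pvRstripTailAux : List (List Char) → List (List Char)
  | [] => []
  | w :: rest =>
    if PySem.Chars.rstrip w = [] then pvRstripTailAux rest
    else PySem.Chars.rstrip w :: rest

def pvRstripTail (ws : List (List Char)) : List (List Char) :=
  (pvRstripTailAux ws.reverse).reverse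

-- one iteration of B's for-loop; state = (words, glue_next)
def pvBStep (d : PySem.Dict String String) (st : List (List Char) × Bool) (token : String) :
    List (List Char) × Bool :=
  let extracted : List Char := (d.getD token token).toList
  let spacing := pvSPACING.get? token
  let wg : List (List Char) × Bool :=
    match spacing with
    | some sp => if sp.1 = 0 then (pvRstripTail st.1, true) else (st.1, false)
    | none => (st.1, st.2)
  let words :=
    if wg.2 = true ∧ wg.1 ≠ [] then wg.1.dropLast ++ [wg.1.getLastD [] ++ extracted]
    else wg.1 ++ [extracted]
  match spacing with
  | some sp => if sp.2 = 0 then (pvRstripTail words, true) else (words, false)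
  | none => (words, false)

def generate_collapsed_drug_name_alt (drug_detail_dict : List (String × String))
    (token_pattern : List String) : String :=
  let st := token_pattern.foldl (pvBStep (PySem.Dict.mk drug_detail_dict)) ([], false)
  String.ofList (PySem.Chars.join [' '] (PySem.Chars.split₀ (PySem.Chars.join [' '] st.1)))

-- ===== PRECONDITION & SPEC =====
def Spec_generate_collapsed_drug_name (drug_detail_dict : List (String × String)) (token_pattern : List String) (out : String) : Prop := out = generate_collapsed_drug_name_alt drug_detail_dict token_pattern
instance (drug_detail_dict : List (String × String)) (token_pattern : List String) (out : String) : Decidable (Spec_generate_collapsed_drug_name drug_detail_dict token_pattern out) := by unfold Spec_generate_collapsed_drug_name; infer_instance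

-- ===== CLAIM (what is proved, stated in full; the proofs are below) =====
def Claim_equal_generate_collapsed_drug_name : Prop := ∀ (drug_detail_dict : List (String × String)) (token_pattern : List String), Dom_generate_collapsed_drug_name drug_detail_dict token_pattern → Spec_generate_collapsed_drug_name drug_detail_dict token_pattern (generate_collapsed_drug_name drug_detail_dict token_pattern)

-- ===== LEMMAS AND PROOFS =====

-- maximal non-whitespace runs of a char list, with the current run as accumulator
def pvRunsAux : List Char → List Char → List (List Char)
  | [], cur => if cur.isEmpty then [] else [cur]
  | c :: rest, cur =>
    if PySem.Chars.isspace c then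
      (if cur.isEmpty then pvRunsAux rest [] else cur :: pvRunsAux rest [])
    else pvRunsAux rest (cur ++ [c])

def pvRuns (s : List Char) : List (List Char) := pvRunsAux s []

theorem pvGo_eq (s : List Char) : ∀ cur acc,
    PySem.Chars.split₀.go s cur acc = acc.reverse ++ pvRunsAux s cur.reverse := by
  induction s with
  | nil =>
    intro cur acc
    simp only [PySem.Chars.split₀.go, pvRunsAux]
    by_cases h : cur.isEmpty <;> simp [h]
  | cons c rest ih =>
    intro cur acc
    simp only [PySem.Chars.split₀.go, pvRunsAux]
    by_cases hsp : PySem.Chars.isspace c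
    · by_cases h : cur.isEmpty
      · simp [hsp, List.isEmpty_iff.mp h, ih]
      · have : ¬ cur.reverse.isEmpty := by
          simp only [List.isEmpty_iff] at *; simpa using h
        simp [hsp, h, this, ih]
    · have : (c :: cur).reverse = cur.reverse ++ [c] := by simp
      simp [hsp, ih, this]

theorem pvSplit₀_eq_runs (s : List Char) : PySem.Chars.split₀ s = pvRuns s := by
  simpa using pvGo_eq s [] []

theorem pvRunsAux_eq_nil (s : List Char) : ∀ cur, pvRunsAux s cur = [] →
    cur = [] ∧ ∀ a ∈ s, PySem.Chars.isspace a := by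
  induction s with
  | nil =>
    intro cur h
    simp only [pvRunsAux] at h
    by_cases hc : cur.isEmpty
    · exact ⟨List.isEmpty_iff.mp hc, by simp⟩
    · simp [hc] at h
  | cons c rest ih =>
    intro cur h
    simp only [pvRunsAux] at h
    by_cases hsp : PySem.Chars.isspace c
    · by_cases hc : cur.isEmpty
      · simp only [hsp, if_true, hc, if_true] at h
        rcases ih [] h with ⟨_, hall⟩
        exact ⟨List.isEmpty_iff.mp hc, by simpa [hsp] using hall⟩
      · simp [hsp, hc] at h
    · simp only [hsp] at h
      rcases ih _ h with ⟨hc, _⟩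
      simp at hc

theorem pvRunsAux_allws (t : List Char) (ht : ∀ a ∈ t, PySem.Chars.isspace a) :
    ∀ cur, pvRunsAux t cur = if cur.isEmpty then [] else [cur] := by
  induction t with
  | nil => intro cur; rfl
  | cons c rest ih =>
    intro cur
    have hc : PySem.Chars.isspace c := ht c (by simp)
    have hrest : ∀ a ∈ rest, PySem.Chars.isspace a := fun a ha => ht a (by simp [ha])
    by_cases h : cur.isEmpty <;> simp [pvRunsAux, hc, h, ih hrest]

theorem pvRunsAux_append_allws (t : List Char) (ht : ∀ a ∈ t, PySem.Chars.isspace a)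
    (s : List Char) : ∀ cur, pvRunsAux (s ++ t) cur = pvRunsAux s cur := by
  induction s with
  | nil =>
    intro cur
    simpa [pvRunsAux] using pvRunsAux_allws t ht cur
  | cons c rest ih =>
    intro cur
    by_cases hsp : PySem.Chars.isspace c <;> by_cases h : cur.isEmpty <;>
      simp [pvRunsAux, hsp, h, ih]

theorem pvRuns_append_allws (s t : List Char) (ht : ∀ a ∈ t, PySem.Chars.isspace a) :
    pvRuns (s ++ t) = pvRuns s :=
  pvRunsAux_append_allws t ht s []

theorem pvRunsAux_nonspace (w : List Char) (hw : ∀ a ∈ w, ¬ PySem.Chars.isspace a) :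
    ∀ (c : List Char) cur, pvRunsAux (w ++ c) cur = pvRunsAux c (cur ++ w) := by
  induction w with
  | nil => intro c cur; simp
  | cons a rest ih =>
    intro c cur
    have ha : ¬ PySem.Chars.isspace a := hw a (by simp)
    have hrest : ∀ x ∈ rest, ¬ PySem.Chars.isspace x := fun x hx => hw x (by simp [hx])
    simp [pvRunsAux, ha, ih hrest]

theorem pvRuns_pure (w : List Char) (hne : w ≠ []) (hw : ∀ a ∈ w, ¬ PySem.Chars.isspace a) :
    pvRuns w = [w] := by
  have := pvRunsAux_nonspace w hw [] []
  simp only [List.append_nil, List.nil_append] at this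
  simp only [pvRuns, this, pvRunsAux]
  simp [hne]

-- splitting across a whitespace boundary (or an empty left part)
theorem pvRunsAux_append_ws : ∀ (x : List Char), x ≠ [] →
    PySem.Chars.isspace (x.getLastD ' ') = true →
    ∀ (y cur : List Char), pvRunsAux (x ++ y) cur = pvRunsAux x cur ++ pvRuns y := by
  intro x
  induction x with
  | nil => intro h; exact absurd rfl h
  | cons c rest ih =>
    intro _ hx y cur
    rcases eq_or_ne rest [] with rfl | hr
    · have hc : PySem.Chars.isspace c := by simpa using hx
      by_cases h : cur.isEmpty <;> simp [pvRunsAux, hc, h, pvRuns]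
    · have hx' : PySem.Chars.isspace (rest.getLastD ' ') = true := by
        rcases rest with _ | ⟨d, rest'⟩
        · exact absurd rfl hr
        · simpa using hx
      by_cases hsp : PySem.Chars.isspace c <;> by_cases h : cur.isEmpty <;>
        simp [pvRunsAux, hsp, h, ih hr hx']

theorem pvRuns_append_ws (x y : List Char)
    (hx : PySem.Chars.isspace (x.getLastD ' ') = true) :
    pvRuns (x ++ y) = pvRuns x ++ pvRuns y := by
  rcases eq_or_ne x [] with rfl | hne
  · simp [pvRuns, pvRunsAux]
  · exact pvRunsAux_append_ws x hne hx y []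

-- rstrip facts
theorem pvRstrip_decomp (s : List Char) :
    s = PySem.Chars.rstrip s ++ (s.reverse.takeWhile PySem.Chars.isspace).reverse ∧
    (∀ a ∈ (s.reverse.takeWhile PySem.Chars.isspace).reverse, PySem.Chars.isspace a) := by
  constructor
  · have h := List.takeWhile_append_dropWhile (p := PySem.Chars.isspace) (l := s.reverse)
    calc s = (s.reverse).reverse := (s.reverse_reverse).symm
      _ = ((s.reverse.takeWhile PySem.Chars.isspace) ++
            (s.reverse.dropWhile PySem.Chars.isspace)).reverse := by rw [h]
      _ = _ := by rw [List.reverse_append]; rfl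
  · intro a ha
    exact List.mem_takeWhile_imp (by simpa using ha)

theorem pvRuns_rstrip (s : List Char) : pvRuns (PySem.Chars.rstrip s) = pvRuns s := by
  obtain ⟨hdec, hws⟩ := pvRstrip_decomp s
  conv_rhs => rw [hdec]
  rw [pvRuns_append_allws _ _ hws]

theorem pvRstrip_idem (s : List Char) :
    PySem.Chars.rstrip (PySem.Chars.rstrip s) = PySem.Chars.rstrip s := by
  simp [PySem.Chars.rstrip, List.dropWhile_idempotent]

theorem pvRstrip_append_allws (s t : List Char) (ht : ∀ a ∈ t, PySem.Chars.isspace a) :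
    PySem.Chars.rstrip (s ++ t) = PySem.Chars.rstrip s := by
  simp only [PySem.Chars.rstrip, List.reverse_append]
  rw [List.dropWhile_append]
  simp only [List.isEmpty_iff]
  split_ifs with h
  · rfl
  · have : t.reverse.dropWhile PySem.Chars.isspace = [] := by
      rw [List.dropWhile_eq_nil_iff]
      intro x hx; exact ht x (by simpa using hx)
    exact absurd this h

theorem pvRstrip_last (s : List Char) (hs : PySem.Chars.rstrip s = s) (hne : s ≠ []) :
    ¬ PySem.Chars.isspace (s.getLastD ' ') := by
  intro hlast
  have hd : s = s.dropLast ++ [s.getLast hne] := (List.dropLast_append_getLast hne).symm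
  have heq : PySem.Chars.rstrip s = PySem.Chars.rstrip s.dropLast := by
    conv_lhs => rw [hd]
    refine pvRstrip_append_allws _ _ ?_
    intro a ha
    simp only [List.mem_singleton] at ha
    subst ha
    simpa [List.getLastD_eq_getLast?, List.getLast?_eq_getLast_of_ne_nil hne] using hlast
  rw [hs] at heq
  have hlen := congrArg List.length heq
  have h1 : (PySem.Chars.rstrip s.dropLast).length ≤ s.dropLast.length := by
    simpa [PySem.Chars.rstrip] using
      List.length_dropWhile_le PySem.Chars.isspace s.dropLast.reverse
  have h2 : s.dropLast.length = s.length - 1 := s.length_dropLast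
  have h3 : s.length ≠ 0 := by simpa using List.length_pos_of_ne_nil hne |>.ne'
  omega

theorem pvRuns_nil_all_ws (s : List Char) (h : pvRuns s = []) :
    ∀ a ∈ s, PySem.Chars.isspace a :=
  (pvRunsAux_eq_nil s [] h).2

theorem pvRstrip_nil_of_runs_nil (s : List Char) (hs : PySem.Chars.rstrip s = s)
    (h : pvRuns s = []) : s = [] := by
  by_contra hne
  exact pvRstrip_last s hs hne (by
    have hall := pvRuns_nil_all_ws s h
    have : s.getLastD ' ' ∈ s := by
      rw [List.getLastD_eq_getLast?, List.getLast?_eq_getLast_of_ne_nil hne]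
      exact List.getLast_mem hne
    exact hall _ this)

-- decomposition of a right-stripped nonempty list into prefix and last run
theorem pvRuns_decomp (s : List Char) (hs : PySem.Chars.rstrip s = s) (hne : s ≠ []) :
    ∃ p r, s = p ++ r ∧ r ≠ [] ∧
      pvRuns s = pvRuns p ++ [r] ∧
      ∀ e, pvRuns (s ++ e) = pvRuns p ++ pvRunsAux e r := by
  have hlast : ¬ PySem.Chars.isspace (s.getLastD ' ') := pvRstrip_last s hs hne
  set q : Char → Bool := fun c => ! PySem.Chars.isspace c with hq
  set p : List Char := (s.reverse.dropWhile q).reverse with hp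
  set r : List Char := (s.reverse.takeWhile q).reverse with hrr
  have hdec : s = p ++ r := by
    have h := List.takeWhile_append_dropWhile (p := q) (l := s.reverse)
    calc s = (s.reverse).reverse := (s.reverse_reverse).symm
      _ = ((s.reverse.takeWhile q) ++ (s.reverse.dropWhile q)).reverse := by rw [h]
      _ = p ++ r := by rw [List.reverse_append]
  have hcrev : ∃ c t, s.reverse = c :: t ∧ ¬ PySem.Chars.isspace c := by
    rcases h : s.reverse with _ | ⟨c, t⟩
    · exact absurd (by simpa using congrArg List.reverse h) hne
    · refine ⟨c, t, rfl, ?_⟩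
      have hgl : s.getLastD ' ' = c := by
        rw [List.getLastD_eq_getLast?, ← List.head?_reverse, h]; rfl
      rwa [hgl] at hlast
  obtain ⟨c, t, hrev, hc⟩ := hcrev
  have hrne : r ≠ [] := by
    rw [hrr, hrev]
    simp [List.takeWhile, hq, hc]
  have hrall : ∀ a ∈ r, ¬ PySem.Chars.isspace a := by
    intro a ha
    have := List.mem_takeWhile_imp (l := s.reverse) (p := q) (by simpa [hrr] using ha)
    simpa [hq] using this
  have hpws : PySem.Chars.isspace (p.getLastD ' ') = true := by
    rcases hdw : s.reverse.dropWhile q with _ | ⟨d, u⟩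
    · have hpnil : p = [] := by rw [hp, hdw]; rfl
      rw [hpnil]
      simp [PySem.Chars.isspace]
    · have hd : q d = false := by
        have := List.head_dropWhile_not q (l := s.reverse) (by rw [hdw]; simp)
        simpa [hdw] using this
      have hdws : PySem.Chars.isspace d := by
        simpa [hq] using hd
      have : p.getLastD ' ' = d := by
        rw [hp, hdw, List.getLastD_eq_getLast?, ← List.head?_reverse]
        simp
      rw [this]
      exact hdws
  refine ⟨p, r, hdec, hrne, ?_, ?_⟩
  · conv_lhs => rw [hdec]
    rw [pvRuns_append_ws _ _ hpws, pvRuns_pure _ hrne hrall]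
  · intro e
    conv_lhs => rw [hdec, List.append_assoc]
    rw [pvRuns_append_ws _ _ hpws]
    congr 1
    exact pvRunsAux_nonspace _ hrall e []

-- the glue step: appending e to the string equals appending e to the last word
theorem pvGlue_append (s w e : List Char) (F : List (List Char))
    (hs : PySem.Chars.rstrip s = s) (hw : PySem.Chars.rstrip w = w) (hwne : w ≠ [])
    (ha : pvRuns s = F ++ pvRuns w) :
    pvRuns (s ++ e) = F ++ pvRuns (w ++ e) := by
  obtain ⟨q, r', hdw, hr'ne, hwruns, hwapp⟩ := pvRuns_decomp w hw hwne
  have hsne : s ≠ [] := by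
    intro h
    subst h
    have : pvRuns ([] : List Char) = [] := rfl
    rw [this] at ha
    have : pvRuns w = [] := by
      have := ha.symm
      rcases List.append_eq_nil_iff.mp this with ⟨_, h2⟩
      exact h2
    rw [hwruns] at this
    simp at this
  obtain ⟨p, r, hds, hrne, hsruns, hsapp⟩ := pvRuns_decomp s hs hsne
  rw [hsruns, hwruns] at ha
  have hkey : pvRuns p = F ++ pvRuns q ∧ r = r' := by
    have : pvRuns p ++ [r] = (F ++ pvRuns q) ++ [r'] := by rw [ha]; simp
    have h2 := List.append_inj' this (by simp)
    exact ⟨h2.1, by simpa using h2.2⟩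
  rw [hsapp e, hwapp e, hkey.1, hkey.2]
  simp

-- rstripTail preserves the runs of the word list
theorem pvRstripTailAux_runs (l : List (List Char)) :
    ((pvRstripTailAux l).map pvRuns).reverse.flatten = ((l.map pvRuns)).reverse.flatten := by
  induction l with
  | nil => rfl
  | cons w rest ih =>
    by_cases h : PySem.Chars.rstrip w = []
    · have hw : pvRuns w = [] := by
        rw [← pvRuns_rstrip w, h]; rfl
      simpa [pvRstripTailAux, h, hw] using ih
    · simp [pvRstripTailAux, h, pvRuns_rstrip w]

theorem pvRstripTail_runs (ws : List (List Char)) :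
    ((pvRstripTail ws).map pvRuns).flatten = (ws.map pvRuns).flatten := by
  calc ((pvRstripTail ws).map pvRuns).flatten
      = (((pvRstripTailAux ws.reverse).map pvRuns).reverse).flatten := by
        simp [pvRstripTail]
    _ = (ws.map pvRuns).flatten := by
        rw [pvRstripTailAux_runs ws.reverse]
        simp

theorem pvRstripTail_last (ws : List (List Char)) :
    pvRstripTail ws = [] ∨
      ((pvRstripTail ws).getLastD [] ≠ [] ∧
       PySem.Chars.rstrip ((pvRstripTail ws).getLastD []) = (pvRstripTail ws).getLastD []) := by
  rw [pvRstripTail]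
  induction ws.reverse with
  | nil => left; rfl
  | cons w rest ih =>
    by_cases h : PySem.Chars.rstrip w = []
    · simpa [pvRstripTailAux, h] using ih
    · right
      have : ((PySem.Chars.rstrip w :: rest).reverse).getLastD [] = PySem.Chars.rstrip w := by
        rw [List.getLastD_eq_getLast?, ← List.head?_reverse]; simp
      simp only [pvRstripTailAux, h, if_false, this]
      exact ⟨h, pvRstrip_idem w⟩

-- join with spaces has the concatenated runs
theorem pvRuns_join (ws : List (List Char)) :
    pvRuns (PySem.Chars.join [' '] ws) = (ws.map pvRuns).flatten := by
  induction ws with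
  | nil => rfl
  | cons w rest ih =>
    rcases rest with _ | ⟨v, rest'⟩
    · simp [PySem.Chars.join, List.intercalate]
    · have hj : PySem.Chars.join [' '] (w :: v :: rest') =
          (w ++ [' ']) ++ PySem.Chars.join [' '] (v :: rest') := by
        simp [PySem.Chars.join, List.intercalate, List.intersperse]
      rw [hj, pvRuns_append_ws _ _ (by simp [PySem.Chars.isspace]),
        pvRuns_append_allws w [' '] (by simp [PySem.Chars.isspace]), ih]
      simp

-- the extracted token is the same in both ports
theorem pvExtract_eq (d : PySem.Dict String String) (t : String) :
    (if d.contains t = true then ((d.get? t).getD t).toList else t.toList) =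
    (d.getD t t).toList := by
  rw [PySem.Dict.getD_eq_get?_getD, PySem.Dict.contains_eq_isSome_get?]
  rcases h : d.get? t with _ | v
  · rfl
  · rfl

-- the invariant tying A's string to B's (words, glue_next) state
def pvInv (s : List Char) (ws : List (List Char)) (glue : Bool) : Prop :=
  pvRuns s = (ws.map pvRuns).flatten ∧
  (glue = true → PySem.Chars.rstrip s = s ∧
    (ws = [] ∨ (ws.getLastD [] ≠ [] ∧
      PySem.Chars.rstrip (ws.getLastD []) = ws.getLastD []))) ∧
  (glue = false → PySem.Chars.isspace (s.getLastD ' ') = true)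

theorem pvInv_rstrip (s : List Char) (ws : List (List Char))
    (h1 : pvRuns s = (ws.map pvRuns).flatten) :
    pvInv (PySem.Chars.rstrip s) (pvRstripTail ws) true := by
  refine ⟨?_, fun _ => ⟨pvRstrip_idem s, pvRstripTail_last ws⟩, by simp⟩
  rw [pvRuns_rstrip, pvRstripTail_runs]
  exact h1

theorem pvInv_space (s : List Char) (ws : List (List Char))
    (h1 : pvRuns s = (ws.map pvRuns).flatten) :
    pvInv (s ++ [' ']) ws false := by
  refine ⟨?_, by simp, fun _ => ?_⟩
  · rw [pvRuns_append_allws s [' '] (by simp [PySem.Chars.isspace])]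
    exact h1
  · have hl : ((s ++ [' ']).getLastD ' ') = ' ' := by
      rw [List.getLastD_eq_getLast?, ← List.head?_reverse]; simp
    rw [hl]
    simp [PySem.Chars.isspace]

theorem pvInv_append (s : List Char) (ws : List (List Char)) (g : Bool) (e : List Char)
    (h : pvInv s ws g) :
    pvRuns (s ++ e) =
      ((if g = true ∧ ws ≠ [] then ws.dropLast ++ [ws.getLastD [] ++ e]
        else ws ++ [e]).map pvRuns).flatten := by
  obtain ⟨ha, hb, hc⟩ := h
  by_cases hg : g = true ∧ ws ≠ []
  · obtain ⟨hs, hlast⟩ := hb hg.1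
    rcases hlast with hnil | ⟨hwne, hwstrip⟩
    · exact absurd hnil hg.2
    · have hdec : ws = ws.dropLast ++ [ws.getLastD []] := by
        rw [List.getLastD_eq_getLast?, List.getLast?_eq_getLast_of_ne_nil hg.2]
        exact (List.dropLast_append_getLast hg.2).symm
      have hF : pvRuns s = ((ws.dropLast).map pvRuns).flatten ++ pvRuns (ws.getLastD []) := by
        rw [ha]; conv_lhs => rw [hdec]
        simp
      have := pvGlue_append s (ws.getLastD []) e ((ws.dropLast).map pvRuns).flatten
        hs hwstrip hwne hF
      rw [if_pos hg, this]
      simp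
  · rw [if_neg hg]
    have hsplit : pvRuns (s ++ e) = pvRuns s ++ pvRuns e := by
      rcases g with _ | _
      · exact pvRuns_append_ws s e (hc rfl)
      · rcases (not_and_or.mp hg) with h1 | h2
        · simp at h1
        · have hwnil : ws = [] := not_not.mp h2
          subst hwnil
          have h0 : pvRuns ([] : List Char) = [] := rfl
          have hrs : pvRuns s = [] := by simpa [h0] using ha
          have hnil : s = [] := pvRstrip_nil_of_runs_nil s (hb rfl).1 hrs
          subst hnil
          simp [h0]
    rw [hsplit, ha]
    simp

theorem pvStep_inv (d : PySem.Dict String String) (t : String)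
    (s : List Char) (i : Int) (ws : List (List Char)) (g : Bool)
    (h : pvInv s ws g) :
    pvInv (pvAStep d (s, i) t).1 (pvBStep d (ws, g) t).1 (pvBStep d (ws, g) t).2 := by
  have hext := pvExtract_eq d t
  simp only [pvAStep, pvBStep, hext]
  rcases hsp : pvSPACING.get? t with _ | sp
  · -- not a spacing token: append extracted, then a space; glue decision from g
    simp only
    exact pvInv_space _ _ (pvInv_append s ws g (d.getD t t).toList h)
  · simp only
    by_cases h1 : sp.1 = 0
    · -- before: rstrip the string / the word tail, glue
      have hmid := pvInv_rstrip s ws h.1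
      have h2 := pvInv_append (PySem.Chars.rstrip s) (pvRstripTail ws) true
        (d.getD t t).toList hmid
      by_cases h3 : sp.2 = 0
      · simp only [h1, h3, reduceIte]
        exact pvInv_rstrip _ _ (by simpa [h1, h3] using h2)
      · simp only [h1, h3, reduceIte]
        exact pvInv_space _ _ (by simpa [h1, h3] using h2)
    · -- before: add a space, start a new word
      have hmid := pvInv_space s ws h.1
      have h2 := pvInv_append (s ++ [' ']) ws false (d.getD t t).toList hmid
      by_cases h3 : sp.2 = 0
      · simp only [h1, h3, reduceIte]
        exact pvInv_rstrip _ _ (by simpa [h1, h3] using h2)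
      · simp only [h1, h3, reduceIte]
        exact pvInv_space _ _ (by simpa [h1, h3] using h2)

theorem pvFold_inv (d : PySem.Dict String String) (tp : List String) :
    ∀ (s : List Char) (i : Int) (ws : List (List Char)) (g : Bool), pvInv s ws g →
      pvInv (tp.foldl (pvAStep d) (s, i)).1
        (tp.foldl (pvBStep d) (ws, g)).1 (tp.foldl (pvBStep d) (ws, g)).2 := by
  induction tp with
  | nil => intro s i ws g h; exact h
  | cons t rest ih =>
    intro s i ws g h
    have hst := pvStep_inv d t s i ws g h
    simp only [List.foldl_cons]
    have : pvBStep d (ws, g) t =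
        ((pvBStep d (ws, g) t).1, (pvBStep d (ws, g) t).2) := rfl
    rw [this]
    have hA : pvAStep d (s, i) t = ((pvAStep d (s, i) t).1, (pvAStep d (s, i) t).2) := rfl
    rw [hA]
    exact ih _ _ _ _ hst

-- ===== VERDICT (by name: the statement is the Claim_ definition above) =====
theorem generate_collapsed_drug_name_spec : Claim_equal_generate_collapsed_drug_name := by
  intro dd tp _
  unfold Spec_generate_collapsed_drug_name
  unfold generate_collapsed_drug_name generate_collapsed_drug_name_alt
  have hinit : pvInv [] [] false := by
    refine ⟨rfl, by simp, fun _ => by simp [PySem.Chars.isspace]⟩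
  have h := pvFold_inv (PySem.Dict.mk dd) tp [] 0 [] false hinit
  simp only
  rw [pvSplit₀_eq_runs, pvSplit₀_eq_runs, pvRuns_rstrip, pvRuns_join, h.1]
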